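-- pv_equiv track=rewrite | github.com/AugustChaoTW/opencode-crane | src/crane/tools/pipeline.py | _resolve_steps
-- ===== SOURCE A (Python) =====
-- def _resolve_steps(
--     base_steps: list[str],
--     skip_steps: list[str],
--     stop_after: str,
-- ) -> list[str]:
--     steps = [step for step in base_steps if step not in skip_steps]
--     if stop_after and stop_after in steps:
--         stop_idx = steps.index(stop_after)
--         return steps[: stop_idx + 1]
--     return steps
-- ===== SOURCE B (Python) =====
-- def _resolve_steps(
--     base_steps: list[str],
--     skip_steps: list[str],
--     stop_after: str,
-- ) -> list[str]:
--     result = []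
--     for step in base_steps:
--         if step in skip_steps:
--             continue
--         result.append(step)
--         if stop_after and step == stop_after:
--             break
--     return result
-- ===== Notes on version B (the rewrite author's own statement) =====
-- stated objective: simpler
-- what changed: Fuses A's filter pass plus separate index/slice pass into one loop that appends non-skipped steps and breaks right after appending stop_after.
import Mathlib
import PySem

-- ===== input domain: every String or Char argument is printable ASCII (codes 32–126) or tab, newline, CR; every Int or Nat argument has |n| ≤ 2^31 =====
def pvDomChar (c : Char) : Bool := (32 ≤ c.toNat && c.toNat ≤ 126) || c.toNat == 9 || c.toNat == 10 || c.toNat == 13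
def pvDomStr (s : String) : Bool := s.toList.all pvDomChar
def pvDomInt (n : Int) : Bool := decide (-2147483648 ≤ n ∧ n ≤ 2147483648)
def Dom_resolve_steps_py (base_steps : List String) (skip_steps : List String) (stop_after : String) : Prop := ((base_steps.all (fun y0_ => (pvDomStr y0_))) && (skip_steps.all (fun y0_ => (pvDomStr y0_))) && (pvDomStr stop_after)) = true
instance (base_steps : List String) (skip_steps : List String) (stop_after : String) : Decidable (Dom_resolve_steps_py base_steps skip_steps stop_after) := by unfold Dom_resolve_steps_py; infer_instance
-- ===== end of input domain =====

-- B fuses A's filter pass and separate index/slice pass into one loop that breaks after appending stop_after (simpler, same behaviour).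


-- ===== PORT A =====
def resolve_steps_py (base_steps : List String) (skip_steps : List String) (stop_after : String) : List String :=
  let steps := base_steps.filter (fun step => !(skip_steps.contains step))
  if stop_after ≠ "" ∧ stop_after ∈ steps then
    match PySem.List.index? steps stop_after with
    | some stop_idx => PySem.List.slice steps none (some ((stop_idx : Int) + 1))
    | none => steps
  else steps

-- ===== PORT B =====
def resolve_steps_py_altGo (skip_steps : List String) (stop_after : String) : List String → List String
  | [] => []
  | step :: rest =>
    if skip_steps.contains step then resolve_steps_py_altGo skip_steps stop_after rest
    else if stop_after ≠ "" ∧ step = stop_after then [step]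
    else step :: resolve_steps_py_altGo skip_steps stop_after rest

def resolve_steps_py_alt (base_steps : List String) (skip_steps : List String) (stop_after : String) : List String :=
  resolve_steps_py_altGo skip_steps stop_after base_steps

-- ===== PRECONDITION & SPEC =====
def Spec_resolve_steps_py (base_steps : List String) (skip_steps : List String) (stop_after : String) (out : List String) : Prop := out = resolve_steps_py_alt base_steps skip_steps stop_after
instance (base_steps : List String) (skip_steps : List String) (stop_after : String) (out : List String) : Decidable (Spec_resolve_steps_py base_steps skip_steps stop_after out) := by unfold Spec_resolve_steps_py; infer_instance

-- ===== CLAIM (what is proved, stated in full; the proofs are below) =====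
def Claim_equal_resolve_steps_py : Prop := ∀ (base_steps : List String) (skip_steps : List String) (stop_after : String), Dom_resolve_steps_py base_steps skip_steps stop_after → Spec_resolve_steps_py base_steps skip_steps stop_after (resolve_steps_py base_steps skip_steps stop_after)

-- ===== LEMMAS AND PROOFS =====

-- proof-only helper: the "truncate at the first stop_after (if stop_after truthy)" shape
def truncGo (stop_after : String) : List String → List String
  | [] => []
  | y :: ys => if stop_after ≠ "" ∧ y = stop_after then [y] else y :: truncGo stop_after ys

lemma truncGo_empty (ys : List String) : truncGo "" ys = ys := by
  induction ys with
  | nil => rfl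
  | cons y ys ih => simp [truncGo, ih]

lemma trunc_spec (stop_after : String) (ys : List String) :
    (if stop_after ≠ "" ∧ stop_after ∈ ys then
      match PySem.List.index? ys stop_after with
      | some stop_idx => PySem.List.slice ys none (some ((stop_idx : Int) + 1))
      | none => ys
    else ys) = truncGo stop_after ys := by
  induction ys with
  | nil => simp [truncGo]
  | cons y ys ih =>
    by_cases hne : stop_after = ""
    · subst hne; simp [truncGo_empty]
    · by_cases hy : y = stop_after
      · subst hy
        rw [if_pos ⟨hne, List.mem_cons_self⟩, PySem.List.index?_cons_self]
        show PySem.List.slice (y :: ys) none (some ((0:Nat) + 1)) = _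
        rw [PySem.List.slice_to _ (by omega : (0:Int) ≤ ((0:Nat):Int) + 1)]
        simp [truncGo, hne]
      · have hidx := PySem.List.index?_cons_of_ne (x := y) (v := stop_after) ys hy
        by_cases hm : stop_after ∈ ys
        · rw [if_pos ⟨hne, List.mem_cons_of_mem _ hm⟩]
          obtain ⟨k, hk⟩ := Option.isSome_iff_exists.mp
            ((PySem.List.index?_isSome_iff ys stop_after).mpr hm)
          rw [hidx, hk]
          simp only [Option.map_some]
          push_cast
          rw [PySem.List.slice_to _ (by omega : (0:Int) ≤ ((k:Int) + 1) + 1)]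
          have h1 : (((k:Int) + 1) + 1).toNat = k + 2 := by omega
          rw [h1, List.take_succ_cons]
          have hys : truncGo stop_after ys = List.take (k + 1) ys := by
            rw [← ih, if_pos ⟨hne, hm⟩, hk]
            show PySem.List.slice ys none (some ((k:Int) + 1)) = _
            rw [PySem.List.slice_to _ (by omega : (0:Int) ≤ (k:Int) + 1)]
            have h2 : ((k:Int) + 1).toNat = k + 1 := by omega
            rw [h2]
          simp [truncGo, hy, hne, hys]
        · have hcond : ¬ (stop_after ≠ "" ∧ stop_after ∈ y :: ys) := by
            intro ⟨_, h⟩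
            rcases List.mem_cons.mp h with h | h
            · exact hy h.symm
            · exact hm h
          rw [if_neg hcond]
          have h2 := ih
          rw [if_neg (by intro ⟨_, h⟩; exact hm h)] at h2
          show y :: ys = truncGo stop_after (y :: ys)
          simp only [truncGo]
          rw [if_neg (by intro ⟨_, h⟩; exact hy h), ← h2]

lemma altGo_eq_trunc_filter (skip_steps : List String) (stop_after : String) (l : List String) :
    resolve_steps_py_altGo skip_steps stop_after l
      = truncGo stop_after (l.filter (fun step => !(skip_steps.contains step))) := by
  induction l with
  | nil => rfl
  | cons s rest ih =>
    unfold resolve_steps_py_altGo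
    rw [List.filter_cons]
    by_cases hsk : s ∈ skip_steps
    · have hb : skip_steps.contains s = true := by simpa using hsk
      rw [if_pos hb, ih]
      have hb2 : (!skip_steps.contains s) = false := by simp [hsk]
      rw [hb2]
      simp
    · by_cases hstop : stop_after ≠ "" ∧ s = stop_after
      · obtain ⟨hne, heq⟩ := hstop
        subst heq
        simp [hsk, hne, truncGo]
      · simp [hsk, hstop, truncGo, ih]

-- ===== VERDICT (by name: the statement is the Claim_ definition above) =====
theorem resolve_steps_py_spec : Claim_equal_resolve_steps_py := by
  intro base_steps skip_steps stop_after _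
  unfold Spec_resolve_steps_py resolve_steps_py_alt resolve_steps_py
  rw [altGo_eq_trunc_filter, ← trunc_spec]
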